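-- pv_equiv track=rewrite | github.com/lagillenwater/multi-dwpc | archive/scripts/plot_top_paths_networks.py | reverse_metapath_abbrev
-- ===== SOURCE A (Python) =====
-- def reverse_metapath_abbrev(metapath: str) -> str:
--     node_abbrevs = {"G", "BP", "CC", "MF", "PW", "A", "D", "C", "SE", "S", "PC"}
--     edge_abbrevs = {"p", "i", "c", "r", ">", "<", "a", "d", "u", "e", "b", "t", "l"}
--     tokens = []
--     pos = 0
--     while pos < len(metapath):
--         if pos + 2 <= len(metapath) and metapath[pos:pos+2] in node_abbrevs:
--             tokens.append(metapath[pos:pos+2])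
--             pos += 2
--         elif metapath[pos] in node_abbrevs:
--             tokens.append(metapath[pos])
--             pos += 1
--         elif metapath[pos] in edge_abbrevs:
--             tokens.append(metapath[pos])
--             pos += 1
--         elif metapath[pos] == ">":
--             tokens.append(">")
--             pos += 1
--         elif metapath[pos] == "<":
--             tokens.append("<")
--             pos += 1
--         else:
--             pos += 1
--     direction_map = {">": "<", "<": ">"}
--     reversed_tokens = []
--     for token in reversed(tokens):
--         if token in direction_map:
--             reversed_tokens.append(direction_map[token])
--         else:
--             reversed_tokens.append(token)
--     return "".join(reversed_tokens)
-- ===== SOURCE B (Python) =====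
-- import re
--
-- _TOKEN_RE = re.compile(r"BP|CC|MF|PW|SE|PC|[GADCS]|[picraduebtl><]")
-- _FLIP = {">": "<", "<": ">"}
--
-- def reverse_metapath_abbrev(metapath: str) -> str:
--     tokens = _TOKEN_RE.findall(metapath)
--     return "".join(_FLIP.get(tok, tok) for tok in reversed(tokens))
-- ===== Notes on version B (the rewrite author's own statement) =====
-- stated objective: idiomatic
-- what changed: Replaces the hand-written position-arithmetic while-loop scanner (per-character slice tests against two membership sets plus redundant direction branches) by a single re.findall with an ordered alternation pattern (two-char abbrevs, node char class, edge char class) followed by a reversed map that swaps the two direction characters; findall's non-matching gaps reproduce the skip branch.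
import Mathlib
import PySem

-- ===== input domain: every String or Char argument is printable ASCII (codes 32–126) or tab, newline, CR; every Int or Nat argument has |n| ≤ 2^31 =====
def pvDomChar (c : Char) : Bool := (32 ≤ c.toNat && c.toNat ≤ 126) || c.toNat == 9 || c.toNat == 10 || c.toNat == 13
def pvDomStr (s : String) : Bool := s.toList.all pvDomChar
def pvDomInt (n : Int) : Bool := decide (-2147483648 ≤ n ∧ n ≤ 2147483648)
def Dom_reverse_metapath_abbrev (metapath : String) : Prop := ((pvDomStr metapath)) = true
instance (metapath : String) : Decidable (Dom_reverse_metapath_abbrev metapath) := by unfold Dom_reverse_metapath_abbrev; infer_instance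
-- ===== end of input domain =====

-- B replaces A's hand-written position-arithmetic scanner by a single regex-findall tokenization
-- (ordered alternation) followed by a reversed map; same result, a different decomposition (idiomatic).

-- ===== PORT A =====
-- tokens are List Char (Python str tokens), per the PySem convention of working on the char-list side
def pvNodeSet : PySem.Set (List Char) :=
  PySem.Set.ofList [['G'], ['B','P'], ['C','C'], ['M','F'], ['P','W'], ['A'], ['D'], ['C'], ['S','E'], ['S'], ['P','C']]

def pvEdgeSet : PySem.Set (List Char) :=
  PySem.Set.ofList [['p'], ['i'], ['c'], ['r'], ['>'], ['<'], ['a'], ['d'], ['u'], ['e'], ['b'], ['t'], ['l']]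

-- the while loop: pos becomes the remaining suffix; metapath[pos:pos+2] is the 2-char prefix (only when pos+2 <= len)
def pvTokensA : List Char → List (List Char)
  | c1 :: c2 :: rest =>
    if pvNodeSet.contains [c1, c2] then [c1, c2] :: pvTokensA rest
    else if pvNodeSet.contains [c1] then [c1] :: pvTokensA (c2 :: rest)
    else if pvEdgeSet.contains [c1] then [c1] :: pvTokensA (c2 :: rest)
    else if c1 = '>' then ['>'] :: pvTokensA (c2 :: rest)
    else if c1 = '<' then ['<'] :: pvTokensA (c2 :: rest)
    else pvTokensA (c2 :: rest)
  | [c1] =>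
    if pvNodeSet.contains [c1] then [[c1]]
    else if pvEdgeSet.contains [c1] then [[c1]]
    else if c1 = '>' then [['>']]
    else if c1 = '<' then [['<']]
    else []
  | [] => []

def pvDirMap : PySem.Dict (List Char) (List Char) := PySem.Dict.ofList [(['>'], ['<']), (['<'], ['>'])]

-- the for loop building reversed_tokens
def pvRevTokensA (tokens : List (List Char)) : List (List Char) :=
  tokens.reverse.foldl
    (fun acc token =>
      if pvDirMap.contains token then acc ++ [(pvDirMap.get? token).getD token]
      else acc ++ [token]) []

def reverse_metapath_abbrev (metapath : String) : String :=
  String.ofList (PySem.Chars.join [] (pvRevTokensA (pvTokensA metapath.toList)))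

-- ===== PORT B =====
-- the regex r"BP|CC|MF|PW|SE|PC|[GADCS]|[picraduebtl><]": ordered alternation tried at each
-- position; on failure the engine advances one char (findall drops the gap)
def pvAltLiterals : List (List Char) := [['B','P'], ['C','C'], ['M','F'], ['P','W'], ['S','E'], ['P','C']]
def pvNodeClass : List Char := ['G', 'A', 'D', 'C', 'S']
def pvEdgeClass : List Char := ['p', 'i', 'c', 'r', 'a', 'd', 'u', 'e', 'b', 't', 'l', '>', '<']

def pvFindall : List Char → List (List Char)
  | c1 :: c2 :: rest =>
    match pvAltLiterals.find? (fun l => l == [c1, c2]) with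
    | some t => t :: pvFindall rest
    | none =>
      if c1 ∈ pvNodeClass then [c1] :: pvFindall (c2 :: rest)
      else if c1 ∈ pvEdgeClass then [c1] :: pvFindall (c2 :: rest)
      else pvFindall (c2 :: rest)
  | [c1] =>
    if c1 ∈ pvNodeClass then [[c1]]
    else if c1 ∈ pvEdgeClass then [[c1]]
    else []
  | [] => []

def pvFlipMap : PySem.Dict (List Char) (List Char) := PySem.Dict.ofList [(['>'], ['<']), (['<'], ['>'])]

def pvFlip (t : List Char) : List Char := pvFlipMap.getD t t

def reverse_metapath_abbrev_alt (metapath : String) : String :=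
  String.ofList (PySem.Chars.join [] (((pvFindall metapath.toList).reverse).map pvFlip))

-- ===== PRECONDITION & SPEC =====
def Spec_reverse_metapath_abbrev (metapath : String) (out : String) : Prop := out = reverse_metapath_abbrev_alt metapath
instance (metapath : String) (out : String) : Decidable (Spec_reverse_metapath_abbrev metapath out) := by unfold Spec_reverse_metapath_abbrev; infer_instance

-- ===== CLAIM (what is proved, stated in full; the proofs are below) =====
def Claim_equal_reverse_metapath_abbrev : Prop := ∀ (metapath : String), Dom_reverse_metapath_abbrev metapath → Spec_reverse_metapath_abbrev metapath (reverse_metapath_abbrev metapath)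


-- ===== LEMMAS AND PROOFS =====

-- the strings of length 2 in A's node_abbrevs set are exactly B's two-char alternation literals
theorem pv_two_mem (c1 c2 : Char) : (pvNodeSet.contains [c1, c2] = true) ↔ [c1, c2] ∈ pvAltLiterals := by
  have h : pvNodeSet = [['G'], ['B','P'], ['C','C'], ['M','F'], ['P','W'], ['A'], ['D'], ['C'], ['S','E'], ['S'], ['P','C']] := by decide
  rw [h]; simp [pvAltLiterals]

-- the strings of length 1 in A's node_abbrevs set are exactly B's node char class
theorem pv_node1 (c : Char) : (pvNodeSet.contains [c] = true) ↔ c ∈ pvNodeClass := by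
  have h : pvNodeSet = [['G'], ['B','P'], ['C','C'], ['M','F'], ['P','W'], ['A'], ['D'], ['C'], ['S','E'], ['S'], ['P','C']] := by decide
  rw [h]; simp [pvNodeClass]

-- A's edge_abbrevs set (all length-1) is exactly B's edge char class
theorem pv_edge1 (c : Char) : (pvEdgeSet.contains [c] = true) ↔ c ∈ pvEdgeClass := by
  have h : pvEdgeSet = [['p'], ['i'], ['c'], ['r'], ['>'], ['<'], ['a'], ['d'], ['u'], ['e'], ['b'], ['t'], ['l']] := by decide
  rw [h]; simp [pvEdgeClass]; tauto

theorem pv_find_self {x : List Char} {xs : List (List Char)} (h : x ∈ xs) :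
    xs.find? (fun l => l == x) = some x := by
  induction xs with
  | nil => simp at h
  | cons a t ih =>
    by_cases ha : a = x
    · simp [ha]
    · rcases List.mem_cons.mp h with h1 | h2
      · exact absurd h1.symm ha
      · simp [ha, ih h2]

theorem pv_find_none {x : List Char} {xs : List (List Char)} (h : x ∉ xs) :
    xs.find? (fun l => l == x) = none :=
  List.find?_eq_none.mpr (fun a ha hbeq => h (by rwa [eq_of_beq hbeq] at ha))

theorem pv_tokens_eq (cs : List Char) : pvTokensA cs = pvFindall cs := by
  induction cs using pvTokensA.induct with
  | case1 c1 c2 rest h ih =>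
    have hm : [c1, c2] ∈ pvNodeSet := by simpa using h
    simp [pvTokensA, pvFindall, hm, pv_find_self ((pv_two_mem c1 c2).mp h), ih]
  | case2 c1 c2 rest h2 h ih =>
    have hm2 : [c1, c2] ∉ pvNodeSet := by simpa using h2
    have hm : [c1] ∈ pvNodeSet := by simpa using h
    have hf := pv_find_none (fun hm => h2 ((pv_two_mem c1 c2).mpr hm))
    simp [pvTokensA, pvFindall, hm2, hm, hf, (pv_node1 c1).mp h, ih]
  | case3 c1 c2 rest h2 hn h ih =>
    have hm2 : [c1, c2] ∉ pvNodeSet := by simpa using h2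
    have hmn : [c1] ∉ pvNodeSet := by simpa using hn
    have hme : [c1] ∈ pvEdgeSet := by simpa using h
    have hf := pv_find_none (fun hm => h2 ((pv_two_mem c1 c2).mpr hm))
    have hn' : c1 ∉ pvNodeClass := fun hc => hn ((pv_node1 c1).mpr hc)
    simp [pvTokensA, pvFindall, hm2, hmn, hme, hf, hn', (pv_edge1 c1).mp h, ih]
  | case4 c2 rest h2 hn he ih =>
    exact absurd ((pv_edge1 '>').mpr (by decide)) he
  | case5 c2 rest h2 hn he hgt ih =>
    exact absurd ((pv_edge1 '<').mpr (by decide)) he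
  | case6 c1 c2 rest h2 hn he hgt hlt ih =>
    have hm2 : [c1, c2] ∉ pvNodeSet := by simpa using h2
    have hmn : [c1] ∉ pvNodeSet := by simpa using hn
    have hme : [c1] ∉ pvEdgeSet := by simpa using he
    have hf := pv_find_none (fun hm => h2 ((pv_two_mem c1 c2).mpr hm))
    have hn' : c1 ∉ pvNodeClass := fun hc => hn ((pv_node1 c1).mpr hc)
    have he' : c1 ∉ pvEdgeClass := fun hc => he ((pv_edge1 c1).mpr hc)
    simp [pvTokensA, pvFindall, hm2, hmn, hme, hgt, hlt, hf, hn', he', ih]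
  | case7 c1 h =>
    have hm : [c1] ∈ pvNodeSet := by simpa using h
    simp [pvTokensA, pvFindall, hm, (pv_node1 c1).mp h]
  | case8 c1 hn h =>
    have hmn : [c1] ∉ pvNodeSet := by simpa using hn
    have hme : [c1] ∈ pvEdgeSet := by simpa using h
    have hn' : c1 ∉ pvNodeClass := fun hc => hn ((pv_node1 c1).mpr hc)
    simp [pvTokensA, pvFindall, hmn, hme, hn', (pv_edge1 c1).mp h]
  | case9 hn he =>
    exact absurd ((pv_edge1 '>').mpr (by decide)) he
  | case10 hn he hgt =>
    exact absurd ((pv_edge1 '<').mpr (by decide)) he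
  | case11 c1 hn he hgt hlt =>
    have hmn : [c1] ∉ pvNodeSet := by simpa using hn
    have hme : [c1] ∉ pvEdgeSet := by simpa using he
    have hn' : c1 ∉ pvNodeClass := fun hc => hn ((pv_node1 c1).mpr hc)
    have he' : c1 ∉ pvEdgeClass := fun hc => he ((pv_edge1 c1).mpr hc)
    simp [pvTokensA, pvFindall, hmn, hme, hgt, hlt, hn', he']
  | case12 => rfl

theorem pv_flip_pointwise (t : List Char) :
    (if pvDirMap.contains t then (pvDirMap.get? t).getD t else t) = pvFlip t := by
  by_cases h1 : t = ['>']
  · subst h1; decide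
  by_cases h2 : t = ['<']
  · subst h2; decide
  have e1 : (['>'] == t) = false := by simpa using fun h => h1 h.symm
  have e2 : (['<'] == t) = false := by simpa using fun h => h2 h.symm
  simp [pvDirMap, pvFlip, pvFlipMap, PySem.Dict.ofList, PySem.Dict.get?, PySem.Dict.getD,
    PySem.Dict.contains, PySem.Dict.update, PySem.Dict.empty, PySem.Dict.insert, e1, e2]

theorem pv_rev_eq (ts : List (List Char)) : pvRevTokensA ts = ts.reverse.map pvFlip := by
  unfold pvRevTokensA
  have hbody : (fun (acc : List (List Char)) token =>
      if pvDirMap.contains token then acc ++ [(pvDirMap.get? token).getD token]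
      else acc ++ [token]) = fun acc token => acc ++ [pvFlip token] := by
    funext acc t
    rw [← pv_flip_pointwise t]
    split_ifs <;> rfl
  rw [hbody]
  simpa using PySem.List.foldl_append_singleton_eq_map (acc := []) pvFlip ts.reverse

-- ===== VERDICT (by name: the statement is the Claim_ definition above) =====
theorem reverse_metapath_abbrev_spec : Claim_equal_reverse_metapath_abbrev := by
  intro metapath _
  unfold Spec_reverse_metapath_abbrev reverse_metapath_abbrev reverse_metapath_abbrev_alt
  rw [pv_tokens_eq, pv_rev_eq]
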